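-- pv_equiv track=rewrite | github.com/SaintHazzard/PythonHazzard | cursoBasicoPython/SORTEDsentence.py | order2
-- ===== SOURCE A (Python) =====
-- def order2(sentence):
--     sentence=sentence.split()
--     order_sentence = []
--     for i in range(1,10):
--         for w in sentence:
--             if str(i) in w:
--                 order_sentence.append(w)
--     return " ".join(order_sentence)
-- ===== SOURCE B (Python) =====
-- def order2(sentence):
--     buckets = {d: [] for d in range(1, 10)}
--     for w in sentence.split():
--         for d in range(1, 10):
--             if str(d) in w:
--                 buckets[d].append(w)
--     return " ".join(w for d in range(1, 10) for w in buckets[d])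
-- ===== Notes on version B (the rewrite author's own statement) =====
-- stated objective: alternative
-- what changed: Single pass over the words maintaining nine digit-keyed buckets (dict of lists) that are concatenated at the end, instead of nine separate scans of the word list, one per digit.
import Mathlib
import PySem

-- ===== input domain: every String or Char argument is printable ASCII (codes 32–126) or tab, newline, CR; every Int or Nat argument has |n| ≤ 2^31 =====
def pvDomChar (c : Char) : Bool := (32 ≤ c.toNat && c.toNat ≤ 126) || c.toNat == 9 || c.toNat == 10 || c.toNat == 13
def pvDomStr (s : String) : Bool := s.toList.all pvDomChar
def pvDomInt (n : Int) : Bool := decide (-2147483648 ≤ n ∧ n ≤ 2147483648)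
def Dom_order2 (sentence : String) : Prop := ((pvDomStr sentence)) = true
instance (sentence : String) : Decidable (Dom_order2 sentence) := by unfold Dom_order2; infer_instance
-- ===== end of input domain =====

-- B replaces A's nine scans of the word list (one per digit) by one pass that
-- distributes each word into nine digit buckets, concatenated at the end (objective: alternative).

-- ===== PORT A =====
-- nine passes: for i in 1..9 append every word containing str(i)
def order2 (sentence : String) : String :=
  let ws := PySem.Str.split₀ sentence
  let order_sentence : List String :=
    (PySem.List.pyRange 1 10 1).foldl (fun acc i =>
      ws.foldl (fun acc w =>
        if PySem.Str.isIn (PySem.Int.toStr i) w then acc ++ [w] else acc) acc) []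
  PySem.Str.join " " order_sentence

-- ===== PORT B =====
-- one pass, nine buckets keyed by the digit, kept as an association list in key order
def order2_alt (sentence : String) : String :=
  let buckets0 : List (Int × List String) :=
    (PySem.List.pyRange 1 10 1).map (fun d => (d, []))
  let buckets : List (Int × List String) :=
    (PySem.Str.split₀ sentence).foldl (fun bs w =>
      bs.map (fun p =>
        if PySem.Str.isIn (PySem.Int.toStr p.1) w then (p.1, p.2 ++ [w]) else p)) buckets0
  PySem.Str.join " " (buckets.flatMap (fun p => p.2))

-- ===== PRECONDITION & SPEC =====
def Spec_order2 (sentence : String) (out : String) : Prop := out = order2_alt sentence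
instance (sentence : String) (out : String) : Decidable (Spec_order2 sentence out) := by unfold Spec_order2; infer_instance

-- ===== CLAIM (what is proved, stated in full; the proofs are below) =====
def Claim_equal_order2 : Prop := ∀ (sentence : String), Dom_order2 sentence → Spec_order2 sentence (order2 sentence)

-- ===== LEMMAS AND PROOFS =====

-- folding a per-element map over the whole list = mapping the per-pair fold
theorem foldl_map_comm {α β : Type} (g : α → β → β) :
    ∀ (ws : List α) (init : List β),
      ws.foldl (fun bs w => bs.map (g w)) init
        = init.map (fun p => ws.foldl (fun p w => g w p) p) := by
  intro ws
  induction ws with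
  | nil => intro init; simp
  | cons w ws ih =>
      intro init
      simp only [List.foldl_cons, ih (init.map (g w)), List.map_map]
      rfl

-- one bucket's fold collects exactly the words containing its digit, in order
theorem bucket_fold_eq (d : Int) :
    ∀ (ws : List String) (b : List String),
      ws.foldl (fun (p : Int × List String) w =>
          if PySem.Str.isIn (PySem.Int.toStr p.1) w then (p.1, p.2 ++ [w]) else p) (d, b)
        = (d, b ++ ws.filter (fun w => PySem.Str.isIn (PySem.Int.toStr d) w)) := by
  intro ws
  induction ws with
  | nil => intro b; simp
  | cons w ws ih =>
      intro b
      simp only [List.foldl_cons, List.filter_cons]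
      by_cases h : PySem.Str.isIn (PySem.Int.toStr d) w = true
      · rw [if_pos h, if_pos h, ih]; simp
      · rw [if_neg h, if_neg h, ih]

-- ===== VERDICT (by name: the statement is the Claim_ definition above) =====
theorem order2_spec : Claim_equal_order2 := by
  intro sentence _
  unfold Spec_order2 order2 order2_alt
  simp only [foldl_map_comm, List.map_map, Function.comp_def, bucket_fold_eq,
    List.nil_append, List.flatMap_map,
    PySem.List.foldl_append_if_eq_filter]
  congr 1
  rw [PySem.List.foldl_append_eq_flatMap
    (g := fun i => (PySem.Str.split₀ sentence).filter
      (fun w => PySem.Str.isIn (PySem.Int.toStr i) w))]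
  simp
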